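-- pv_equiv track=rewrite | github.com/shaiss/CodeSorcerer | audit_near/categories/functionality.py | _identify_entry_points
-- ===== SOURCE A (Python) =====
-- from typing import Dict, List, Tuple
--
-- def _identify_entry_points(files: List[Tuple[str, str]]) -> List[str]:
--     """
--     Identify main entry points and APIs.
--
--     Args:
--         files: List of (file_path, file_content) tuples
--
--     Returns:
--         List of entry point file paths
--     """
--     entry_points = []
--
--     # Common entry point patterns
--     entry_point_patterns = [
--         "index.js", "main.js", "app.js", "server.js",
--         "index.ts", "main.ts", "app.ts", "server.ts",
--         "main.py", "app.py", "main.rs", "lib.rs",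
--     ]
--
--     # Check for common entry points
--     for pattern in entry_point_patterns:
--         matches = [path for path, _ in files if path.endswith(pattern)]
--         entry_points.extend(matches)
--
--     # Look for contract files
--     contract_files = [
--         path for path, _ in files
--         if "contract" in path.lower() and path.endswith((".rs", ".ts", ".js"))
--     ]
--     entry_points.extend(contract_files)
--
--     # Look for API routes
--     api_routes = [
--         path for path, _ in files
--         if "api" in path.lower() and path.endswith((".js", ".ts", ".py"))
--     ]
--     entry_points.extend(api_routes)
--
--     return list(set(entry_points))  # Remove duplicates
-- ===== SOURCE B (Python) =====
-- from typing import Dict, List, Tuple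
--
-- def _identify_entry_points(files: List[Tuple[str, str]]) -> List[str]:
--     """One pass over files: a path is an entry point if it ends with one of the
--     common entry-point names, or is a contract/API file; duplicates are dropped
--     in first-occurrence order."""
--     entry_suffixes = (
--         "index.js", "main.js", "app.js", "server.js",
--         "index.ts", "main.ts", "app.ts", "server.ts",
--         "main.py", "app.py", "main.rs", "lib.rs",
--     )
--     out = []
--     for path, _ in files:
--         low = path.lower()
--         if (path.endswith(entry_suffixes)
--                 or ("contract" in low and path.endswith((".rs", ".ts", ".js")))
--                 or ("api" in low and path.endswith((".js", ".ts", ".py")))):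
--             if path not in out:
--                 out.append(path)
--     return out
-- ===== Notes on version B (the rewrite author's own statement) =====
-- stated objective: simpler
-- what changed: One combined pass over the files list with an ordered de-duplicating accumulator replaces A's 14 separate scans (12 per-pattern list comprehensions plus contract and api scans) followed by list(set(...)).
import Mathlib
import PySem

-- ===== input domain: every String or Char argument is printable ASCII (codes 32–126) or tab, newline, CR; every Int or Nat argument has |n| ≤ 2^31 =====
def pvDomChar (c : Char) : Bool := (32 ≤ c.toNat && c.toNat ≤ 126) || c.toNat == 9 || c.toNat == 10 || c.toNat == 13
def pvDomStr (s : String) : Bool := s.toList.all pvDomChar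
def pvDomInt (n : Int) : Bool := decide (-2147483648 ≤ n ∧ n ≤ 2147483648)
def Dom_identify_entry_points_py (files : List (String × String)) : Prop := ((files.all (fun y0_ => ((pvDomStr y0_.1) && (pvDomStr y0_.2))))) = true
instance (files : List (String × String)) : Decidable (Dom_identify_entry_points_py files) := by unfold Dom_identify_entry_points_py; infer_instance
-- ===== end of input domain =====

-- B replaces A's 14 separate scans of the file list by one combined pass with an ordered
-- de-duplicating accumulator (objective: simpler); equal to A wherever A's result order is determined.


-- ===== PORT A =====
def aPatterns : List String :=
  ["index.js", "main.js", "app.js", "server.js",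
   "index.ts", "main.ts", "app.ts", "server.ts",
   "main.py", "app.py", "main.rs", "lib.rs"]

-- literal port of A; 'return list(set(entry_points))' is PySem.Set.ofList, exact here because
-- Pre_ admits only inputs whose set has at most one element (list(set(..)) order is determined there)
def identify_entry_points_py (files : List (String × String)) : List String :=
  let entry_points : List String :=
    aPatterns.foldl
      (fun acc pattern =>
        acc ++ (files.filter (fun f => PySem.Str.endswith f.1 pattern)).map (fun f => f.1)) []
  let contract_files : List String :=
    (files.filter (fun f =>
        PySem.Str.isIn "contract" (PySem.Str.lower f.1) &&
        (PySem.Str.endswith f.1 ".rs" || PySem.Str.endswith f.1 ".ts" ||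
         PySem.Str.endswith f.1 ".js"))).map (fun f => f.1)
  let entry_points := entry_points ++ contract_files
  let api_routes : List String :=
    (files.filter (fun f =>
        PySem.Str.isIn "api" (PySem.Str.lower f.1) &&
        (PySem.Str.endswith f.1 ".js" || PySem.Str.endswith f.1 ".ts" ||
         PySem.Str.endswith f.1 ".py"))).map (fun f => f.1)
  let entry_points := entry_points ++ api_routes
  PySem.Set.ofList entry_points

-- ===== PORT B =====
def epSuffixes : List String :=
  ["index.js", "main.js", "app.js", "server.js",
   "index.ts", "main.ts", "app.ts", "server.ts",
   "main.py", "app.py", "main.rs", "lib.rs"]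

def epMatch (path : String) : Bool :=
  let low := PySem.Str.lower path
  epSuffixes.any (fun p => PySem.Str.endswith path p) ||
  (PySem.Str.isIn "contract" low &&
    (PySem.Str.endswith path ".rs" || PySem.Str.endswith path ".ts" ||
     PySem.Str.endswith path ".js")) ||
  (PySem.Str.isIn "api" low &&
    (PySem.Str.endswith path ".js" || PySem.Str.endswith path ".ts" ||
     PySem.Str.endswith path ".py"))

def identify_entry_points_py_alt (files : List (String × String)) : List String :=
  files.foldl
    (fun out f => if epMatch f.1 && !(out.contains f.1) then out ++ [f.1] else out) []

-- ===== PRECONDITION & SPEC =====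
-- (independent copy of the match predicate, so Pre_'s closure reaches neither port)
def preSuffixes : List String :=
  ["index.js", "main.js", "app.js", "server.js",
   "index.ts", "main.ts", "app.ts", "server.ts",
   "main.py", "app.py", "main.rs", "lib.rs"]

def preMatch (path : String) : Bool :=
  let low := PySem.Str.lower path
  preSuffixes.any (fun p => PySem.Str.endswith path p) ||
  (PySem.Str.isIn "contract" low &&
    (PySem.Str.endswith path ".rs" || PySem.Str.endswith path ".ts" ||
     PySem.Str.endswith path ".js")) ||
  (PySem.Str.isIn "api" low &&
    (PySem.Str.endswith path ".js" || PySem.Str.endswith path ".ts" ||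
     PySem.Str.endswith path ".py"))

-- Pre_ excludes inputs with two or more DISTINCT matching paths, on which A's final
-- list(set(entry_points)) order is CPython's accidental hash-iteration order.
def Pre_identify_entry_points_py (files : List (String × String)) : Prop :=
  (PySem.List.dedup ((files.filter (fun f => preMatch f.1)).map (fun f => f.1))).length ≤ 1
instance (files : List (String × String)) : Decidable (Pre_identify_entry_points_py files) := by
  unfold Pre_identify_entry_points_py; infer_instance

def pvWitness_identify_entry_points_py : (List (String × String)) :=
  [("src/main.py", "print('hi')"), ("README.md", "docs"), ("src/main.py", "")]

def Spec_identify_entry_points_py (files : List (String × String)) (out : List String) : Prop :=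
  out = identify_entry_points_py_alt files
instance (files : List (String × String)) (out : List String) :
    Decidable (Spec_identify_entry_points_py files out) := by
  unfold Spec_identify_entry_points_py; infer_instance

-- ===== CLAIM (what is proved, stated in full; the proofs are below) =====
def Claim_equal_identify_entry_points_py : Prop :=
  ∀ (files : List (String × String)), Dom_identify_entry_points_py files →
    Pre_identify_entry_points_py files →
    Spec_identify_entry_points_py files (identify_entry_points_py files)

-- ===== LEMMAS AND PROOFS =====

theorem preMatch_eq_epMatch (path : String) : preMatch path = epMatch path := rfl

-- B's loop builds set(matched paths) in first-occurrence order
theorem alt_fold (files : List (String × String)) (acc : List String) :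
    files.foldl
        (fun out f => if epMatch f.1 && !(out.contains f.1) then out ++ [f.1] else out) acc
      = PySem.Set.update acc ((files.filter (fun f => epMatch f.1)).map (fun f => f.1)) := by
  induction files generalizing acc with
  | nil => simp [PySem.Set.update_nil]
  | cons f fs ih =>
    by_cases h : epMatch f.1
    · have : (if epMatch f.1 && !(acc.contains f.1) then acc ++ [f.1] else acc)
          = PySem.Set.add acc f.1 := by
        cases hc : List.contains acc f.1 <;>
          simp [PySem.Set.add, PySem.Set.contains, h] <;> simpa using hc
      rw [List.foldl_cons, this, ih]
      simp [h, PySem.Set.update_cons]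
    · rw [List.foldl_cons, if_neg (by simp [h]), ih]
      simp [h]

theorem alt_eq_ofList (files : List (String × String)) :
    identify_entry_points_py_alt files =
      PySem.Set.ofList ((files.filter (fun f => epMatch f.1)).map (fun f => f.1)) := by
  unfold identify_entry_points_py_alt
  rw [alt_fold, PySem.Set.update_nil_left]

-- membership in A's concatenated entry_points list = the combined predicate
theorem mem_A_list (files : List (String × String)) (x : String) :
    (x ∈ aPatterns.foldl
        (fun acc pattern =>
          acc ++ (files.filter (fun f => PySem.Str.endswith f.1 pattern)).map (fun f => f.1)) []
        ++ (files.filter (fun f =>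
            PySem.Str.isIn "contract" (PySem.Str.lower f.1) &&
            (PySem.Str.endswith f.1 ".rs" || PySem.Str.endswith f.1 ".ts" ||
             PySem.Str.endswith f.1 ".js"))).map (fun f => f.1)
        ++ (files.filter (fun f =>
            PySem.Str.isIn "api" (PySem.Str.lower f.1) &&
            (PySem.Str.endswith f.1 ".js" || PySem.Str.endswith f.1 ".ts" ||
             PySem.Str.endswith f.1 ".py"))).map (fun f => f.1)) ↔
      x ∈ (files.filter (fun f => epMatch f.1)).map (fun f => f.1) := by
  simp only [PySem.List.foldl_append_eq_flatMap, List.nil_append, List.mem_append,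
    List.mem_flatMap, List.mem_map, List.mem_filter, epMatch, Bool.or_eq_true,
    Bool.and_eq_true, List.any_eq_true]
  constructor
  · rintro ((⟨p, hp, a, ⟨ha, he⟩, rfl⟩ | ⟨a, ⟨ha, hc⟩, rfl⟩) | ⟨a, ⟨ha, hc⟩, rfl⟩)
    · exact ⟨a, ⟨ha, Or.inl (Or.inl ⟨p, hp, he⟩)⟩, rfl⟩
    · exact ⟨a, ⟨ha, Or.inl (Or.inr hc)⟩, rfl⟩
    · exact ⟨a, ⟨ha, Or.inr hc⟩, rfl⟩
  · rintro ⟨a, ⟨ha, (⟨p, hp, he⟩ | hc) | hc⟩, rfl⟩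
    · exact Or.inl (Or.inl ⟨p, hp, a, ⟨ha, he⟩, rfl⟩)
    · exact Or.inl (Or.inr ⟨a, ⟨ha, hc⟩, rfl⟩)
    · exact Or.inr ⟨a, ⟨ha, hc⟩, rfl⟩

theorem nodup_eq_of_mem_of_len_le_one {α : Type} [DecidableEq α] (s t : List α)
    (hs : s.Nodup) (ht : t.Nodup) (hmem : ∀ x, x ∈ s ↔ x ∈ t) (hlen : t.length ≤ 1) :
    s = t := by
  have hp : s.Perm t := (List.perm_ext_iff_of_nodup hs ht).2 hmem
  match t with
  | [] => exact hp.eq_nil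
  | [a] => exact List.perm_singleton.1 hp
  | a :: b :: rest => simp at hlen

-- ===== VERDICT (by name: the statement is the Claim_ definition above) =====
theorem identify_entry_points_py_spec : Claim_equal_identify_entry_points_py := by
  intro files _ hpre
  unfold Spec_identify_entry_points_py
  unfold Pre_identify_entry_points_py at hpre
  simp only [preMatch_eq_epMatch, PySem.List.dedup_eq_ofList] at hpre
  rw [alt_eq_ofList]
  unfold identify_entry_points_py
  refine nodup_eq_of_mem_of_len_le_one _ _ (PySem.Set.nodup_ofList _)
    (PySem.Set.nodup_ofList _) (fun x => ?_) ?_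
  · rw [PySem.Set.mem_ofList, PySem.Set.mem_ofList]
    exact mem_A_list files x
  · exact hpre
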